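-- pv_equiv track=rewrite | github.com/azwdevops/coding-challenges | g_solutions/sliding_window/easy.py | dieterPoints
-- ===== SOURCE A (Python) =====
-- def dieterPoints(calories, k, lower, upper):
--   n = len(calories)
--   if n < k:
--     return 0 # if there are fewer than k days, no points can be gained or lost
--   # initialize the sum of the first window
--   current_sum = sum(calories[:k])
--   points = 0
--   # initial points calculation for the first window
--   if current_sum < lower:
--     points -= 1
--   elif current_sum > upper:
--     points += 1
--   # slide the window from start to end
--   for i in range(1, n - k + 1):
--     # slide the window: subtract the element that's sliding out and add the new element
--     current_sum = current_sum - calories[i - 1] + calories[i + k - 1]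
--     # calculate points for the new window
--     if current_sum < lower:
--       points -= 1
--     elif current_sum > upper:
--       points += 1
--   return points
-- ===== SOURCE B (Python) =====
-- def dieterPoints(calories, k, lower, upper):
--     n = len(calories)
--     # prefix-sum table: prefix[i] = sum of the first i calories
--     prefix = [0]
--     for c in calories:
--         prefix.append(prefix[-1] + c)
--     points = 0
--     for i in range(n - k + 1):
--         s = prefix[i + k] - prefix[i]
--         if s < lower:
--             points -= 1
--         elif s > upper:
--             points += 1
--     return points
-- ===== Notes on version B (the rewrite author's own statement) =====
-- stated objective: alternative
-- what changed: Replaces the rolling incremental window sum (special first-window setup plus subtract/add sliding updates) with a prefix-sum table, so every window sum is a single subtraction P[i+k]-P[i] in one uniform loop with no n<k guard.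
import Mathlib
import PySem

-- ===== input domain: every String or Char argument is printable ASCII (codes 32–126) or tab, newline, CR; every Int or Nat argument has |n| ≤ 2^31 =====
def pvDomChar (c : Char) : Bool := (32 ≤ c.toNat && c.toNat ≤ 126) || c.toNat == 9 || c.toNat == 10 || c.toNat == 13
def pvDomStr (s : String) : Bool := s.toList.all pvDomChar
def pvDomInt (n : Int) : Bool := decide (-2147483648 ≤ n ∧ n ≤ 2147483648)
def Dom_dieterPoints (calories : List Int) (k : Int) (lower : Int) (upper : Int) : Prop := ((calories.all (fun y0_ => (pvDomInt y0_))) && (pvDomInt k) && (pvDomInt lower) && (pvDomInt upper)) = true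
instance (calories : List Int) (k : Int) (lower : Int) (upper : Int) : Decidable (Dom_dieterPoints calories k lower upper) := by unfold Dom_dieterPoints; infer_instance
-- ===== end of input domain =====

-- B replaces A's rolling incremental window sum with a prefix-sum table (one uniform loop,
-- each window sum a single subtraction); same O(n) cost, different algorithm.

-- ===== PORT A =====
-- A's loop body: slide the window and update the points (the two if-branches of A's loop)
def pvStepA (calories : List Int) (k lower upper : Int) (st : Int × Int) (i : Int) : Int × Int :=
  let cs := st.1 - PySem.List.pyGetD calories (i - 1) 0
                 + PySem.List.pyGetD calories (i + k - 1) 0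
  let pts := if cs < lower then st.2 - 1 else if cs > upper then st.2 + 1 else st.2
  (cs, pts)

def dieterPoints (calories : List Int) (k : Int) (lower : Int) (upper : Int) : Int :=
  let n : Int := calories.length
  if n < k then 0
  else
    let currentSum : Int := (PySem.List.slice calories none (some k)).sum
    let points0 : Int := 0
    let points : Int :=
      if currentSum < lower then points0 - 1
      else if currentSum > upper then points0 + 1 else points0
    let st := (PySem.List.pyRange 1 (n - k + 1)).foldl (pvStepA calories k lower upper)
      (currentSum, points)
    st.2

-- ===== PORT B =====
-- B's loop body: score window i from the prefix-sum table
def pvStepB (pre : List Int) (k lower upper : Int) (points : Int) (i : Int) : Int :=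
  let s := PySem.List.pyGetD pre (i + k) 0 - PySem.List.pyGetD pre i 0
  if s < lower then points - 1 else if s > upper then points + 1 else points

def dieterPoints_alt (calories : List Int) (k : Int) (lower : Int) (upper : Int) : Int :=
  let n : Int := calories.length
  let pre := calories.foldl (fun acc c => acc ++ [PySem.List.pyGetD acc (-1) 0 + c]) [(0 : Int)]
  (PySem.List.pyRange 0 (n - k + 1)).foldl (pvStepB pre k lower upper) 0

-- ===== PRECONDITION & SPEC =====
-- Pre_ excludes exactly k < 0, on which Python A raises IndexError (its sliding loop
-- indexes past the end of the list); A returns normally on every input with k ≥ 0.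
def Pre_dieterPoints (calories : List Int) (k : Int) (lower : Int) (upper : Int) : Prop := 0 ≤ k
instance (calories : List Int) (k : Int) (lower : Int) (upper : Int) : Decidable (Pre_dieterPoints calories k lower upper) := by unfold Pre_dieterPoints; infer_instance
def pvWitness_dieterPoints : List Int × Int × Int × Int := ([1, 2, 3], 2, 2, 4)

def Spec_dieterPoints (calories : List Int) (k : Int) (lower : Int) (upper : Int) (out : Int) : Prop := out = dieterPoints_alt calories k lower upper
instance (calories : List Int) (k : Int) (lower : Int) (upper : Int) (out : Int) : Decidable (Spec_dieterPoints calories k lower upper out) := by unfold Spec_dieterPoints; infer_instance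

-- ===== CLAIM (what is proved, stated in full; the proofs are below) =====
def Claim_equal_dieterPoints : Prop := ∀ (calories : List Int) (k : Int) (lower : Int) (upper : Int), Dom_dieterPoints calories k lower upper → Pre_dieterPoints calories k lower upper → Spec_dieterPoints calories k lower upper (dieterPoints calories k lower upper)

-- ===== LEMMAS AND PROOFS =====

-- score of one window (±1 or 0)
def pvScore (lower upper s : Int) : Int := if s < lower then -1 else if s > upper then 1 else 0

-- the sum of window i of width K, written as a prefix-sum difference
def pvW (cal : List Int) (K i : Nat) : Int := (cal.take (i + K)).sum - (cal.take i).sum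

-- the prefix-sum table B builds, characterized entrywise
def pvP (cal : List Int) : List Int := (List.range (cal.length + 1)).map (fun j => (cal.take j).sum)

lemma pv_branch (lower upper s p : Int) :
    (if s < lower then p - 1 else if s > upper then p + 1 else p) = p + pvScore lower upper s := by
  unfold pvScore; split_ifs <;> ring

lemma pv_take_succ_sum (cal : List Int) (j : Nat) (hj : j < cal.length) :
    (cal.take (j + 1)).sum = (cal.take j).sum + cal.getD j 0 := by
  rw [List.sum_take_succ cal j hj]
  simp [List.getD, List.getElem?_eq_getElem hj]

-- the sliding-window identity behind A's incremental update
lemma pv_slide (cal : List Int) (K b : Nat) (h : b + 1 + K ≤ cal.length) :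
    pvW cal K b - cal.getD b 0 + cal.getD (b + K) 0 = pvW cal K (b + 1) := by
  unfold pvW
  rw [show b + 1 + K = (b + K) + 1 by ring, pv_take_succ_sum cal (b + K) (by omega),
      pv_take_succ_sum cal b (by omega)]
  ring

lemma pvP_step (done : List Int) (c : Int) :
    pvP done ++ [PySem.List.pyGetD (pvP done) (-1) 0 + c] = pvP (done ++ [c]) := by
  have hlast : PySem.List.pyGetD (pvP done) (-1) 0 = done.sum := by
    have : pvP done = (List.range done.length).map (fun j => (done.take j).sum) ++ [done.sum] := by
      unfold pvP
      rw [List.range_succ, List.map_append]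
      simp
    rw [this]
    simp [PySem.List.pyGetD, PySem.List.pyGet?, PySem.List.pyIdx?]
  rw [hlast]
  unfold pvP
  rw [show (done ++ [c]).length + 1 = (done.length + 1) + 1 by simp]
  rw [List.range_succ (n := done.length + 1), List.map_append]
  congr 1
  · apply List.map_congr_left
    intro j hj
    rw [List.mem_range] at hj
    rw [List.take_append_of_le_length (by omega)]
  · simp

lemma pvP_build : ∀ (rest done : List Int),
    rest.foldl (fun acc c => acc ++ [PySem.List.pyGetD acc (-1) 0 + c]) (pvP done)
      = pvP (done ++ rest) := by
  intro rest
  induction rest with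
  | nil => intro done; simp
  | cons c cs ih =>
    intro done
    rw [List.foldl_cons, pvP_step done c, ih (done ++ [c])]
    simp

lemma pvP_getD (cal : List Int) (j : Nat) (hj : j ≤ cal.length) :
    PySem.List.pyGetD (pvP cal) (↑j) 0 = (cal.take j).sum := by
  rw [PySem.List.pyGetD_natCast]
  unfold pvP
  rw [PySem.List.getD_map_range _ _ _ _ (by omega)]

-- A's loop: starting from window b's sum, t slides accumulate the scores of windows b+1..b+t
lemma pv_loopA (cal : List Int) (K : Nat) (lower upper : Int) (t : Nat) :
    ∀ (b : Nat) (p : Int), b + t + K ≤ cal.length →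
    ((PySem.List.pyRange (↑b + 1) (↑b + 1 + ↑t)).foldl
        (pvStepA cal (↑K) lower upper) (pvW cal K b, p)).2
      = p + ((List.range t).map (fun j => pvScore lower upper (pvW cal K (b + 1 + j)))).sum := by
  induction t with
  | zero =>
    intro b p _
    rw [PySem.List.pyRange_one_eq_nil (by simp)]
    simp
  | succ t ih =>
    intro b p h
    rw [PySem.List.pyRange_one_cons (by push_cast; omega), List.foldl_cons]
    have hstep : pvStepA cal (↑K) lower upper (pvW cal K b, p) (↑b + 1)
        = (pvW cal K (b + 1), p + pvScore lower upper (pvW cal K (b + 1))) := by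
      unfold pvStepA
      rw [show ((b : Int) + 1 - 1) = ((b : Nat) : Int) by ring]
      rw [show ((b : Int) + 1 + (K : Int) - 1) = ((b + K : Nat) : Int) by push_cast; ring]
      rw [PySem.List.pyGetD_natCast cal b 0, PySem.List.pyGetD_natCast cal (b + K) 0]
      simp only []
      rw [pv_slide cal K b (by omega)]
      rw [pv_branch lower upper _ p]
    rw [hstep]
    rw [show (b : Int) + 1 + 1 = ((b + 1 : Nat) : Int) + 1 by push_cast; ring]
    rw [show (b : Int) + 1 + (↑(t + 1) : Int) = ((b + 1 : Nat) : Int) + 1 + (t : Int) by push_cast; ring]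
    rw [ih (b + 1) _ (by omega)]
    rw [List.range_succ_eq_map, List.map_cons, List.map_map, List.sum_cons]
    have hc : (fun j => pvScore lower upper (pvW cal K (b + 1 + j))) ∘ Nat.succ
        = fun j => pvScore lower upper (pvW cal K (b + 1 + 1 + j)) := by
      funext j
      simp only [Function.comp]
      congr 2
      omega
    rw [hc]
    simp only [Nat.add_zero]
    ring

-- B's loop: t lookups in the prefix table accumulate the scores of windows a..a+t-1
lemma pv_loopB (cal : List Int) (K : Nat) (lower upper : Int) (t : Nat) :
    ∀ (a : Nat) (p : Int), a + t + K ≤ cal.length + 1 →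
    (PySem.List.pyRange (↑a) (↑a + ↑t)).foldl (pvStepB (pvP cal) (↑K) lower upper) p
      = p + ((List.range t).map (fun j => pvScore lower upper (pvW cal K (a + j)))).sum := by
  induction t with
  | zero =>
    intro a p _
    rw [PySem.List.pyRange_one_eq_nil (by simp)]
    simp
  | succ t ih =>
    intro a p h
    rw [PySem.List.pyRange_one_cons (by push_cast; omega), List.foldl_cons]
    have hstep : pvStepB (pvP cal) (↑K) lower upper p (↑a)
        = p + pvScore lower upper (pvW cal K a) := by
      unfold pvStepB
      rw [show ((a : Int) + (K : Int)) = ((a + K : Nat) : Int) by push_cast; ring]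
      rw [pvP_getD cal (a + K) (by omega), pvP_getD cal a (by omega)]
      exact pv_branch lower upper _ p
    rw [hstep]
    rw [show (a : Int) + 1 = ((a + 1 : Nat) : Int) by push_cast; ring]
    rw [show (a : Int) + (↑(t + 1) : Int) = ((a + 1 : Nat) : Int) + (t : Int) by push_cast; ring]
    rw [ih (a + 1) _ (by omega)]
    rw [List.range_succ_eq_map, List.map_cons, List.map_map, List.sum_cons]
    have hc : (fun j => pvScore lower upper (pvW cal K (a + j))) ∘ Nat.succ
        = fun j => pvScore lower upper (pvW cal K (a + 1 + j)) := by
      funext j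
      simp only [Function.comp]
      congr 2
      omega
    rw [hc]
    simp only [Nat.add_zero]
    ring

-- ===== VERDICT (by name: the statement is the Claim_ definition above) =====
theorem dieterPoints_spec : Claim_equal_dieterPoints := by
  intro cal k lower upper _ hk
  unfold Spec_dieterPoints
  obtain ⟨K, rfl⟩ : ∃ K : Nat, k = (K : Int) := ⟨k.toNat, (Int.toNat_of_nonneg hk).symm⟩
  simp only [dieterPoints, dieterPoints_alt]
  rw [show [(0 : Int)] = pvP [] from rfl, pvP_build cal [], List.nil_append]
  by_cases hKn : K ≤ cal.length
  · rw [if_neg (by push_cast; omega)]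
    have hcs : (PySem.List.slice cal none (some (K : Int))).sum = pvW cal K 0 := by
      rw [PySem.List.slice_to cal (by positivity)]
      simp [pvW]
    rw [hcs, pv_branch lower upper _ 0]
    have hA := pv_loopA cal K lower upper (cal.length - K) 0
      (0 + pvScore lower upper (pvW cal K 0)) (by omega)
    have hB := pv_loopB cal K lower upper (cal.length - K + 1) 0 0 (by omega)
    norm_num at hA hB
    rw [zero_add]
    rw [show PySem.List.pyRange 1 ((cal.length : Int) - (K : Int) + 1)
          = PySem.List.pyRange 1 (1 + ((cal.length - K : Nat) : Int)) from by
        congr 1; push_cast [hKn]; ring]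
    rw [hA]
    rw [show PySem.List.pyRange 0 ((cal.length : Int) - (K : Int) + 1)
          = PySem.List.pyRange 0 (((cal.length - K : Nat) : Int) + 1) from by
        congr 1; push_cast [hKn]; ring]
    rw [hB]
    rw [List.range_succ_eq_map, List.map_cons, List.map_map, List.sum_cons]
    congr 2
    apply List.map_congr_left
    intro j _
    simp only [Function.comp]
    congr 2
    omega
  · rw [if_pos (by push_cast; omega)]
    rw [PySem.List.pyRange_one_eq_nil (by push_cast; omega)]
    simp
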